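-- pv_equiv track=rewrite | github.com/Patrix726/Competitive-Programming | Leetcode/Maximum Subsequence Score.py | maxScore
-- ===== SOURCE A (Python) =====
-- import heapq
--
-- def maxScore(nums1: list[int], nums2: list[int], k: int) -> int:
--     arr = [(nums2[i], nums1[i]) for i in range(len(nums2))]
--     arr = list(sorted(arr, key=lambda x: x[0]))
--     max_score = 0
--
--     for i in range(len(arr) - k + 1):
--         score = 0
--         n = arr[i][0]
--         m = heapq.nlargest(k - 1, arr[i + 1 :], lambda x: x[1])
--         m.append(arr[i])
--         for key, val in m:
--             score += val
--         score *= n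
--         max_score = max(score, max_score)
--     return max_score
-- ===== SOURCE B (Python) =====
-- def maxScore(nums1: list[int], nums2: list[int], k: int) -> int:
--     # One right-to-left sweep over the pairs sorted by nums2, maintaining the
--     # (k-1) largest nums1-values of the suffix in a capped descending list.
--     arr = sorted(zip(nums2, nums1), key=lambda p: p[0])
--     n = len(arr)
--     best = 0
--     top = []   # descending: the (at most k-1) largest nums1-values of arr[i+1:]
--     s = 0      # sum(top)
--     for i in range(n - 1, -1, -1):
--         n2, n1 = arr[i]
--         if i <= n - k:
--             best = max(best, (s + n1) * n2)
--         j = 0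
--         while j < len(top) and top[j] >= n1:
--             j += 1
--         top.insert(j, n1)
--         s += n1
--         if len(top) > k - 1:
--             s -= top.pop()
--     return best
-- ===== Notes on version B (the rewrite author's own statement) =====
-- stated objective: faster
-- what changed: A re-sorts/scans the whole suffix with heapq.nlargest for every start index (O(n^2 log n)); B sorts once and makes one right-to-left sweep that incrementally maintains the (k-1) largest nums1-values of the suffix in a capped ordered list with a running sum.
import Mathlib
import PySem

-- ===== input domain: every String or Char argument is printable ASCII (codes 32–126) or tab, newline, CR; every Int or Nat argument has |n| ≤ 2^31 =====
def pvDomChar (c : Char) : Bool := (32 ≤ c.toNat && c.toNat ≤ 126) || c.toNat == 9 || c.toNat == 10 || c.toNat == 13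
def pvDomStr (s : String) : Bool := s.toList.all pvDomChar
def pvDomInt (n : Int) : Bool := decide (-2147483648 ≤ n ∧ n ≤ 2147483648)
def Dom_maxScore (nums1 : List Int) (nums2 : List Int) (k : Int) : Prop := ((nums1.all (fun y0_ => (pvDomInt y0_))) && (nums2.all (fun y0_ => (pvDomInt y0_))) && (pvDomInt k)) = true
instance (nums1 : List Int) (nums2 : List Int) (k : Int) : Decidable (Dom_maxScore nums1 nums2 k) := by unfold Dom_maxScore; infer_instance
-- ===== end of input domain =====

-- B replaces A's per-index heapq.nlargest over the whole suffix by ONE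
-- right-to-left sweep maintaining the (k-1) largest nums1-values of the
-- suffix in a capped descending list with a running sum; objective: faster.

-- ===== PORT A =====
-- heapq.nlargest(n, it, key) is documented as sorted(it, key=key, reverse=True)[:n]
-- (exact, including tie order); ported as such.
def pyNlargest (n : Int) (xs : List (Int × Int)) : List (Int × Int) :=
  (PySem.List.sorted xs (fun x => x.2) true).take n.toNat

def maxScore (nums1 : List Int) (nums2 : List Int) (k : Int) : Int :=
  let arr0 := (PySem.List.pyRange 0 (nums2.length : Int) 1).map
      (fun i => (PySem.List.pyGetD nums2 i 0, PySem.List.pyGetD nums1 i 0))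
  let arr := PySem.List.sorted arr0 (fun x => x.1) false
  (PySem.List.pyRange 0 ((arr.length : Int) - k + 1) 1).foldl
    (fun max_score i =>
      let n := (PySem.List.pyGetD arr i (0, 0)).1
      let m := pyNlargest (k - 1) (PySem.List.slice arr (some (i + 1)) none)
                ++ [PySem.List.pyGetD arr i (0, 0)]
      let score := (m.foldl (fun s q => s + q.2) 0) * n
      max score max_score) 0

-- ===== PORT B =====
-- insertion into the descending list `top` (Source B's j-scan + top.insert(j, n1))
def insortDesc (x : Int) : List Int → List Int
  | [] => [x]
  | y :: ys => if y ≥ x then y :: insortDesc x ys else x :: y :: ys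

-- top.pop(): removes and returns the last element (never reached on [] in B)
def popLast : List Int → List Int × Int
  | [] => ([], 0)
  | [y] => ([], y)
  | y :: ys => let r := popLast ys; (y :: r.1, r.2)

-- one iteration of Source B's loop body, state (best, top, s)
def bStep (n k : Int) (pr : Int × Int × Int) (st : Int × List Int × Int) :
    Int × List Int × Int :=
  let best := if pr.1 ≤ n - k then max st.1 ((st.2.2 + pr.2.2) * pr.2.1) else st.1
  let top := insortDesc pr.2.2 st.2.1
  let s := st.2.2 + pr.2.2
  if ((top.length : Int)) > k - 1 then
    let r := popLast top
    (best, r.1, s - r.2)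
  else (best, top, s)

-- Source B's countdown for-loop is ported as a foldr over the enumerated list
-- (foldr processes index n-1 first — exactly the loop's order).
def maxScore_alt (nums1 : List Int) (nums2 : List Int) (k : Int) : Int :=
  let arr := PySem.List.sorted (nums2.zip nums1) (fun p => p.1) false
  let n : Int := arr.length
  ((PySem.List.enumerate arr 0).foldr (bStep n k)
    ((0 : Int), ([] : List Int), (0 : Int))).1

-- ===== PRECONDITION & SPEC =====
-- A raises IndexError when len(nums1) < len(nums2) (nums1[i] in the comprehension)
-- and when k <= 0 (arr[i] at i = len(arr)); Pre_ excludes exactly those inputs.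
def Pre_maxScore (nums1 : List Int) (nums2 : List Int) (k : Int) : Prop :=
  nums2.length ≤ nums1.length ∧ 1 ≤ k
instance (nums1 : List Int) (nums2 : List Int) (k : Int) : Decidable (Pre_maxScore nums1 nums2 k) := by unfold Pre_maxScore; infer_instance

def pvWitness_maxScore : List Int × List Int × Int := ([1, 3, 3, 2], [2, 1, 3, 4], 3)

def Spec_maxScore (nums1 : List Int) (nums2 : List Int) (k : Int) (out : Int) : Prop := out = maxScore_alt nums1 nums2 k
instance (nums1 : List Int) (nums2 : List Int) (k : Int) (out : Int) : Decidable (Spec_maxScore nums1 nums2 k out) := by unfold Spec_maxScore; infer_instance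

-- ===== CLAIM (what is proved, stated in full; the proofs are below) =====
def Claim_equal_maxScore : Prop := ∀ (nums1 : List Int) (nums2 : List Int) (k : Int), Dom_maxScore nums1 nums2 k → Pre_maxScore nums1 nums2 k → Spec_maxScore nums1 nums2 k (maxScore nums1 nums2 k)

-- ===== LEMMAS AND PROOFS =====

-- the m largest values of l, in descending order, and their sum
def topList (m : Nat) (l : List Int) : List Int :=
  (PySem.List.sorted l (fun y => y) true).take m

-- reference recursion: best score over the indices s, s+1, … of the suffix l
def specB (m : Nat) (nk : Int) : List (Int × Int) → Int → Int
  | [], _ => 0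
  | p :: rest, s =>
    let b := specB m nk rest (s + 1)
    if s ≤ nk then max b (((topList m (rest.map Prod.snd)).sum + p.2) * p.1) else b

theorem insortDesc_perm (x : Int) (l : List Int) : (insortDesc x l).Perm (x :: l) := by
  induction l with
  | nil => simp [insortDesc]
  | cons y ys ih =>
    simp only [insortDesc]
    split
    · exact (ih.cons y).trans (List.Perm.swap x y ys)
    · exact List.Perm.refl _

theorem insortDesc_pairwise (x : Int) (l : List Int)
    (h : l.Pairwise (fun a b => b ≤ a)) : (insortDesc x l).Pairwise (fun a b => b ≤ a) := by
  induction l with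
  | nil => simp [insortDesc]
  | cons y ys ih =>
    rcases List.pairwise_cons.mp h with ⟨hy, hys⟩
    simp only [insortDesc]
    split
    · refine List.pairwise_cons.mpr ⟨?_, ih hys⟩
      intro b hb
      rcases List.mem_cons.mp ((insortDesc_perm x ys).mem_iff.mp hb) with h1 | h1
      · subst h1; omega
      · exact hy _ h1
    · refine List.pairwise_cons.mpr ⟨?_, h⟩
      intro b hb
      rcases List.mem_cons.mp hb with rfl | hb
      · omega
      · have := hy _ hb; omega

theorem length_insortDesc (x : Int) (l : List Int) :
    (insortDesc x l).length = l.length + 1 := by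
  induction l with
  | nil => simp [insortDesc]
  | cons y ys ih => simp only [insortDesc]; split <;> simp [ih]

theorem sortedRev_cons (x : Int) (l : List Int) :
    PySem.List.sorted (x :: l) (fun y => y) true
      = insortDesc x (PySem.List.sorted l (fun y => y) true) := by
  refine List.Perm.eq_of_pairwise (le := fun a b : Int => b ≤ a)
    (fun a b _ _ h1 h2 => le_antisymm h2 h1)
    (PySem.List.sorted_pairwise_rev _ _)
    (insortDesc_pairwise _ _ (PySem.List.sorted_pairwise_rev _ _))
    ((PySem.List.sorted_perm _ _ _).trans
      (((PySem.List.sorted_perm l (fun y => y) true).cons x).symm.trans (insortDesc_perm x _).symm))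

theorem take_insortDesc (x : Int) : ∀ (m : Nat) (s : List Int),
    (insortDesc x s).take m = (insortDesc x (s.take m)).take m := by
  intro m
  induction m with
  | zero => simp
  | succ p ihm =>
    intro s
    match s with
    | [] => simp
    | y :: ys =>
      by_cases hyx : y ≥ x
      · simp only [insortDesc, List.take_succ_cons, if_pos hyx]
        rw [ihm ys]
      · simp only [insortDesc, List.take_succ_cons, if_neg hyx]
        congr 1
        cases p with
        | zero => simp
        | succ q => simp [List.take_take]

theorem popLast_eq : ∀ (t : List Int), t ≠ [] → popLast t = (t.dropLast, t.getLastD 0) := by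
  intro t
  induction t with
  | nil => intro h; exact absurd rfl h
  | cons y ys ih =>
    intro _
    match ys, ih with
    | [], _ => rfl
    | z :: zs, ih => simp [popLast, ih (by simp)]

theorem sum_dropLast (t : List Int) (h : t ≠ []) :
    t.dropLast.sum = t.sum - t.getLastD 0 := by
  induction t with
  | nil => exact absurd rfl h
  | cons y ys ih =>
    match ys, ih with
    | [], _ => simp
    | z :: zs, ih => simp only [List.dropLast_cons₂, List.sum_cons, ih (by simp)]; simp; ring

theorem mapsnd_sorted (xs : List (Int × Int)) :
    (PySem.List.sorted xs (fun p => p.2) true).map Prod.snd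
      = PySem.List.sorted (xs.map Prod.snd) (fun y => y) true := by
  refine List.Perm.eq_of_pairwise (le := fun a b : Int => b ≤ a)
    (fun a b _ _ h1 h2 => le_antisymm h2 h1) ?_
    (PySem.List.sorted_pairwise_rev _ _) ?_
  · exact (List.pairwise_map).mpr (PySem.List.sorted_pairwise_rev xs (fun p => p.2))
  · exact ((PySem.List.sorted_perm xs (fun p => p.2) true).map Prod.snd).trans
      (PySem.List.sorted_perm (xs.map Prod.snd) (fun y => y) true).symm

theorem sum_insortDesc (x : Int) (l : List Int) : (insortDesc x l).sum = x + l.sum :=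
  ((insortDesc_perm x l).sum_eq).trans (by simp)

theorem length_topList (m : Nat) (l : List Int) :
    (topList m l).length = min m l.length := by
  simp [topList, PySem.List.length_sorted]

theorem topList_cons (m : Nat) (x : Int) (v : List Int) :
    topList m (x :: v) = (insortDesc x (topList m v)).take m := by
  unfold topList
  rw [sortedRev_cons, take_insortDesc]

-- the B fold over a suffix computes (specB, top list, its sum)
theorem bFold_eq (n k : Int) (m : Nat) (hm : (m : Int) = k - 1) :
    ∀ (l : List (Int × Int)) (s : Int),
      (PySem.List.enumerate l s).foldr (bStep n k) (0, [], 0)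
        = (specB m (n - k) l s, topList m (l.map Prod.snd), (topList m (l.map Prod.snd)).sum) := by
  intro l
  induction l with
  | nil =>
    intro s
    have h0 : PySem.List.sorted ([] : List Int) (fun y => y) true = [] := rfl
    simp [PySem.List.enumerate, specB, topList, h0]
  | cons p rest ih =>
    intro s
    have hen : PySem.List.enumerate (p :: rest) s = (s, p) :: PySem.List.enumerate rest (s + 1) := by
      simp [PySem.List.enumerate]
    rw [hen, List.foldr_cons, ih (s + 1)]
    set v := rest.map Prod.snd with hv
    set t := topList m v with ht
    set t' := insortDesc p.2 t with ht'
    have hlen' : t'.length = min m v.length + 1 := by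
      rw [ht', length_insortDesc, ht, length_topList]
    have htop : topList m (p.2 :: v) = t'.take m := topList_cons m p.2 v
    have hsum' : t'.sum = p.2 + t.sum := sum_insortDesc _ _
    show bStep n k (s, p) _ = _
    unfold bStep
    simp only []
    by_cases hc : ((t'.length : Int)) > k - 1
    · rw [if_pos hc]
      have hlm : t'.length = m + 1 := by omega
      have hne : t' ≠ [] := by intro h; rw [h] at hlm; simp at hlm
      rw [popLast_eq t' hne]
      have hdrop : t'.dropLast = t'.take m := by
        rw [List.dropLast_eq_take, hlm]; simp
      have hsum2 : t'.dropLast.sum = t'.sum - t'.getLastD 0 := sum_dropLast t' hne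
      refine Prod.ext ?_ (Prod.ext ?_ ?_)
      · simp only [specB]; rw [ht, hv]
      · show t'.dropLast = topList m (p.2 :: v)
        rw [htop, hdrop]
      · show t.sum + p.2 - t'.getLastD 0 = (topList m (p.2 :: v)).sum
        rw [htop, ← hdrop, hsum2, hsum']
        ring
    · rw [if_neg hc]
      have hle : t'.length ≤ m := by omega
      have htk : t'.take m = t' := List.take_of_length_le hle
      refine Prod.ext ?_ (Prod.ext ?_ ?_)
      · simp only [specB]; rw [ht, hv]
      · show t' = topList m (p.2 :: v)
        rw [htop, htk]
      · show t.sum + p.2 = (topList m (p.2 :: v)).sum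
        rw [htop, htk, hsum']
        ring

-- indices past nk contribute nothing
theorem specB_gt (m : Nat) (nk : Int) :
    ∀ (l : List (Int × Int)) (s : Int), nk < s → specB m nk l s = 0 := by
  intro l
  induction l with
  | nil => intro s _; rfl
  | cons p rest ih =>
    intro s hs
    simp only [specB]
    rw [if_neg (by omega), ih (s + 1) (by omega)]

-- folding max from the left equals folding it from the right
theorem foldr_max_max {α : Type} (c : α → Int) (l : List α) (a b : Int) :
    l.foldr (fun x acc => max (c x) acc) (max b a) = max b (l.foldr (fun x acc => max (c x) acc) a) := by
  induction l with
  | nil => rfl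
  | cons y ys ih => simp only [List.foldr_cons, ih, max_left_comm]

theorem foldl_max_eq_foldr {α : Type} (c : α → Int) (l : List α) (a : Int) :
    l.foldl (fun acc x => max (c x) acc) a = l.foldr (fun x acc => max (c x) acc) a := by
  induction l generalizing a with
  | nil => rfl
  | cons y ys ih =>
    simp only [List.foldl_cons, List.foldr_cons, ih]
    exact foldr_max_max c ys a (c y)

-- summing the second components with a foldl
theorem foldl_add_snd (xs : List (Int × Int)) (a : Int) :
    xs.foldl (fun s q => s + q.2) a = a + (xs.map Prod.snd).sum := by
  induction xs generalizing a with
  | nil => simp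
  | cons p rest ih => simp only [List.foldl_cons, List.map_cons, List.sum_cons, ih]; ring

-- A's comprehension is zip(nums2, nums1) when nums1 is long enough
theorem comprehension_eq_zip (nums1 nums2 : List Int) (h : nums2.length ≤ nums1.length) :
    (PySem.List.pyRange 0 (nums2.length : Int) 1).map
        (fun i => (PySem.List.pyGetD nums2 i 0, PySem.List.pyGetD nums1 i 0))
      = nums2.zip nums1 := by
  apply List.ext_getElem
  · simp [PySem.List.length_pyRange_one, List.length_zip]; omega
  · intro j h1 h2
    have hj : j < nums2.length := by
      simpa [PySem.List.length_pyRange_one] using h1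
    rw [List.getElem_map, PySem.List.getElem_pyRange_one, List.getElem_zip]
    have e2 : (0 : Int) + (j : Int) = ((j : Nat) : Int) := by omega
    rw [e2, PySem.List.pyGetD_natCast, PySem.List.pyGetD_natCast,
      List.getD_eq_getElem _ _ hj, List.getD_eq_getElem _ _ (by omega)]

-- A's indexed loop over the sorted array equals the reference recursion
theorem specA_aux (arr : List (Int × Int)) (k : Int) (m : Nat) (hk : 1 ≤ k) :
    ∀ (d : Nat) (s : Int), 0 ≤ s → ((arr.length : Int) - k + 1 - s).toNat = d →
      (PySem.List.pyRange s ((arr.length : Int) - k + 1) 1).foldr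
          (fun i acc => max (((topList m ((arr.drop (i.toNat + 1)).map Prod.snd)).sum
              + (arr.getD i.toNat (0, 0)).2) * (arr.getD i.toNat (0, 0)).1) acc) 0
        = specB m ((arr.length : Int) - k) (arr.drop s.toNat) s := by
  intro d
  induction d with
  | zero =>
    intro s hs hd
    have hle : (arr.length : Int) - k + 1 ≤ s := by omega
    rw [PySem.List.pyRange_one_eq_nil hle, List.foldr_nil,
      specB_gt m _ _ s (by omega)]
  | succ d ih =>
    intro s hs hd
    have hlt : s < (arr.length : Int) - k + 1 := by omega
    have hsn : s.toNat < arr.length := by omega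
    rw [PySem.List.pyRange_one_cons hlt, List.foldr_cons, ih (s + 1) (by omega) (by omega)]
    have hdrop : arr.drop s.toNat = arr[s.toNat] :: arr.drop (s.toNat + 1) :=
      (List.getElem_cons_drop hsn).symm
    rw [hdrop]
    simp only [specB]
    rw [if_pos (by omega)]
    have hst : (s + 1).toNat = s.toNat + 1 := by omega
    rw [hst, List.getD_eq_getElem _ _ hsn, max_comm]

-- ===== VERDICT (by name: the statement is the Claim_ definition above) =====
theorem maxScore_spec : Claim_equal_maxScore := by
  intro nums1 nums2 k _ hpre
  obtain ⟨hlen, hk⟩ := hpre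
  unfold Spec_maxScore maxScore maxScore_alt
  simp only []
  rw [comprehension_eq_zip nums1 nums2 hlen]
  set arr := PySem.List.sorted (nums2.zip nums1) (fun p => p.1) false with harr
  set m : Nat := (k - 1).toNat with hmdef
  have hm : (m : Int) = k - 1 := by omega
  -- B side
  rw [bFold_eq (arr.length : Int) k m hm arr 0]
  simp only []
  -- A side: rewrite the loop body pointwise on the range, then flip the fold
  rw [PySem.List.foldl_congr_mem _ _
    (fun acc i => max (((topList m ((arr.drop (i.toNat + 1)).map Prod.snd)).sum
        + (arr.getD i.toNat (0, 0)).2) * (arr.getD i.toNat (0, 0)).1) acc) 0 ?_]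
  · rw [foldl_max_eq_foldr]
    have := specA_aux arr k m hk ((arr.length : Int) - k + 1).toNat 0 le_rfl (by omega)
    simpa using this
  · intro acc i hi
    rw [PySem.List.mem_pyRange_one] at hi
    simp only []
    congr 1
    rw [PySem.List.pyGetD_of_nonneg _ _ hi.1,
      PySem.List.slice_from _ (by omega : (0:Int) ≤ i + 1)]
    have h1 : (i + 1).toNat = i.toNat + 1 := by omega
    rw [h1]
    unfold pyNlargest
    rw [List.foldl_append, List.foldl_cons, List.foldl_nil, foldl_add_snd _ 0]
    have h2 : ((k : Int) - 1).toNat = m := by omega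
    rw [h2]
    have h3 : ((PySem.List.sorted (arr.drop (i.toNat + 1)) (fun x => x.2) true).take m).map Prod.snd
        = topList m ((arr.drop (i.toNat + 1)).map Prod.snd) := by
      rw [List.map_take, mapsnd_sorted]; rfl
    rw [h3]
    ring
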